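-- pv_equiv track=rewrite | github.com/anonymous-secure-marl/PrivacyPreservingSupplyGame | Supply-Chain/marl/util.py | concatenate_spaces
-- ===== SOURCE A (Python) =====
-- def concatenate_spaces(individual_spaces):
--     stacked_size = []
--     head, end = 0, 0
--     for shape in individual_spaces:
--         end = end + shape
--         # end_a = end_a + action_shape
--         range_next = (head, end)
--         # range_a = (head_a, end_a)
--         stacked_size.append(range_next)
--         # action_size.append(range_a)
--         head = end
--         # head_a = end_a
--     return stacked_size
-- ===== SOURCE B (Python) =====
-- def concatenate_spaces(individual_spaces):
--     # Build the ranges back-to-front: start from the grand total and walk the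
--     # sizes in reverse, peeling each size off the running end; reverse at the end.
--     end = sum(individual_spaces)
--     out = []
--     for shape in reversed(individual_spaces):
--         out.append((end - shape, end))
--         end -= shape
--     out.reverse()
--     return out
-- ===== Notes on version B (the rewrite author's own statement) =====
-- stated objective: alternative
-- what changed: Instead of A's forward running head/end accumulator, B computes the grand total first, walks the sizes in reverse subtracting each size from a running end to emit ranges back-to-front, and reverses the result.
import Mathlib
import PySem

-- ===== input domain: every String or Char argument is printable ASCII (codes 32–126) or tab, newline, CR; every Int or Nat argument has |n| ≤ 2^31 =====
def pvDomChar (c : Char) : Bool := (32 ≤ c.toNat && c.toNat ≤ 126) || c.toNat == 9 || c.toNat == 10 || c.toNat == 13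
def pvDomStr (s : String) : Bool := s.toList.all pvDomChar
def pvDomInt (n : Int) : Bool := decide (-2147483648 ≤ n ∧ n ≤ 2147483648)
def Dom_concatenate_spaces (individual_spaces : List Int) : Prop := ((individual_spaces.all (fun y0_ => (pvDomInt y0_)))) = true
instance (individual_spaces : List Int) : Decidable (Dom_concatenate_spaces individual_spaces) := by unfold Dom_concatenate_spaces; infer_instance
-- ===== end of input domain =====

-- B replaces A's forward head/end accumulator loop by a back-to-front build: total sum first,
-- then a reverse walk subtracting each size from the running end, reversed at the end. Same O(n) cost.

-- ===== PORT A =====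
-- A's loop: state (head, end, acc); each step appends (head, end+shape) and advances head
def concatenate_spaces (individual_spaces : List Int) : List (Int × Int) :=
  (individual_spaces.foldl
    (fun st shape =>
      let head := st.1
      let e := st.2.1
      let acc := st.2.2
      let e' := e + shape
      (e', e', acc ++ [(head, e')]))
    ((0 : Int), (0 : Int), ([] : List (Int × Int)))).2.2

-- ===== PORT B =====
-- end = sum(xs); for shape in reversed(xs): append (end-shape, end); end -= shape; reverse
def concatenate_spaces_alt (individual_spaces : List Int) : List (Int × Int) :=
  let total := individual_spaces.foldl (· + ·) 0
  let st := individual_spaces.reverse.foldl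
    (fun (st : Int × List (Int × Int)) shape =>
      (st.1 - shape, st.2 ++ [(st.1 - shape, st.1)]))
    (total, ([] : List (Int × Int)))
  st.2.reverse

-- ===== PRECONDITION & SPEC =====
def Spec_concatenate_spaces (individual_spaces : List Int) (out : List (Int × Int)) : Prop := out = concatenate_spaces_alt individual_spaces
instance (individual_spaces : List Int) (out : List (Int × Int)) : Decidable (Spec_concatenate_spaces individual_spaces out) := by unfold Spec_concatenate_spaces; infer_instance

-- ===== CLAIM (what is proved, stated in full; the proofs are below) =====
def Claim_equal_concatenate_spaces : Prop := ∀ (individual_spaces : List Int), Dom_concatenate_spaces individual_spaces → Spec_concatenate_spaces individual_spaces (concatenate_spaces individual_spaces)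

-- ===== LEMMAS AND PROOFS =====

-- reference function: ranges starting at offset s
def pvRanges (s : Int) : List Int → List (Int × Int)
  | [] => []
  | x :: xs => (s, s + x) :: pvRanges (s + x) xs

theorem pvRanges_append (as : List Int) : ∀ (s y : Int),
    pvRanges s (as ++ [y]) = pvRanges s as ++ [(s + as.sum, s + as.sum + y)] := by
  induction as with
  | nil => intro s y; simp [pvRanges]
  | cons a t ih =>
    intro s y
    simp only [List.cons_append, pvRanges, ih (s + a) y, List.sum_cons]
    ring_nf

theorem foldA_eq (xs : List Int) : ∀ (s : Int) (acc : List (Int × Int)),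
    (xs.foldl
      (fun st shape =>
        let head := st.1
        let e := st.2.1
        let acc := st.2.2
        let e' := e + shape
        (e', e', acc ++ [(head, e')]))
      (s, s, acc)).2.2
    = acc ++ pvRanges s xs := by
  induction xs with
  | nil => intro s acc; simp [pvRanges]
  | cons x t ih =>
    intro s acc
    simp only [List.foldl, pvRanges]
    rw [ih (s + x) (acc ++ [(s, s + x)])]
    simp

theorem foldl_add_eq (xs : List Int) : ∀ (a : Int), xs.foldl (· + ·) a = a + xs.sum := by
  induction xs with
  | nil => intro a; simp
  | cons x t ih => intro a; simp [List.foldl, ih, add_assoc]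

theorem foldB_eq (ys : List Int) : ∀ (s : Int) (acc : List (Int × Int)),
    ys.foldl
      (fun (st : Int × List (Int × Int)) shape =>
        (st.1 - shape, st.2 ++ [(st.1 - shape, st.1)]))
      (s + ys.sum, acc)
    = (s, acc ++ (pvRanges s ys.reverse).reverse) := by
  induction ys with
  | nil => intro s acc; simp [pvRanges]
  | cons y t ih =>
    intro s acc
    simp only [List.foldl, List.sum_cons, List.reverse_cons]
    have h1 : s + (y + t.sum) - y = s + t.sum := by ring
    have h3 : s + (y + t.sum) = s + t.sum + y := by ring
    rw [h1, h3, ih s (acc ++ [(s + t.sum, s + t.sum + y)])]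
    rw [pvRanges_append]
    simp [List.sum_reverse]

theorem concatenate_spaces_eq (xs : List Int) :
    concatenate_spaces xs = concatenate_spaces_alt xs := by
  unfold concatenate_spaces concatenate_spaces_alt
  rw [foldA_eq xs 0 []]
  have ht : xs.foldl (· + ·) 0 = 0 + xs.reverse.sum := by
    rw [foldl_add_eq, List.sum_reverse]
  simp only [ht]
  rw [foldB_eq xs.reverse 0 []]
  simp

-- ===== VERDICT (by name: the statement is the Claim_ definition above) =====
theorem concatenate_spaces_spec : Claim_equal_concatenate_spaces := by
  intro xs _
  unfold Spec_concatenate_spaces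
  exact concatenate_spaces_eq xs
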